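-- pv_equiv track=rewrite | github.com/learn2codblog/AITradingLab | feature_engineering.py | select_best_features
-- ===== SOURCE A (Python) =====
-- def select_best_features(feature_names: list, max_features: int = 50) -> list:
--     """
--     Select top features based on trading logic priority
--
--     Args:
--         feature_names: List of all available feature names
--         max_features: Maximum number of features to return
--
--     Returns:
--         Prioritized list of features
--     """
--
--     # Priority order for trading signals
--     priority_features = [
--         # High Priority: Core signals
--         'Bullish_SMA', 'SMA_Cross_5_20', 'SMA_Cross_20_50',
--         'Momentum_Score', 'RSI14', 'MACD', 'ADX',
--         'Volume_Intensity', 'Close_Position',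
--
--         # Medium Priority: Supporting signals
--         'Price_vs_SMA20', 'Price_vs_SMA50',
--         'Stoch_K', 'Stoch_D', 'EMA_Cross_12_26',
--         'Vol_5d', 'ATR_Ratio', 'OBV_Increasing',
--         'Outperforming', 'Ret_5d',
--
--         # Lower Priority: Additional context
--         'Price_vs_SMA5', 'RSI_Avg', 'Vol_20d',
--         'Consecutive_Ups', 'Ret_Acceleration',
--         'RSI14_Lag1', 'Ret_Lag1',
--     ]
--
--     # Filter for features that exist in the data
--     selected = [f for f in priority_features if f in feature_names]
--
--     # Add remaining features if needed
--     remaining = [f for f in feature_names if f not in selected]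
--     selected.extend(remaining)
--
--     return selected[:max_features]
-- ===== SOURCE B (Python) =====
-- def select_best_features(feature_names: list, max_features: int = 50) -> list:
--     """Decorate-sort-undecorate: tag each kept feature with a sort key
--     (its priority rank, or len(priority)+position for non-priority names,
--     deduping priority names via a seen-rank set), sort once, strip tags."""
--
--     priority_features = [
--         'Bullish_SMA', 'SMA_Cross_5_20', 'SMA_Cross_20_50',
--         'Momentum_Score', 'RSI14', 'MACD', 'ADX',
--         'Volume_Intensity', 'Close_Position',
--         'Price_vs_SMA20', 'Price_vs_SMA50',
--         'Stoch_K', 'Stoch_D', 'EMA_Cross_12_26',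
--         'Vol_5d', 'ATR_Ratio', 'OBV_Increasing',
--         'Outperforming', 'Ret_5d',
--         'Price_vs_SMA5', 'RSI_Avg', 'Vol_20d',
--         'Consecutive_Ups', 'Ret_Acceleration',
--         'RSI14_Lag1', 'Ret_Lag1',
--     ]
--
--     rank = {f: i for i, f in enumerate(priority_features)}
--     big = len(priority_features)
--     seen = set()
--     decorated = []
--     for i, f in enumerate(feature_names):
--         r = rank.get(f)
--         if r is None:
--             decorated.append((big + i, f))
--         elif r not in seen:
--             seen.add(r)
--             decorated.append((r, f))
--     decorated.sort(key=lambda p: p[0])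
--     return [f for _, f in decorated[:max_features]]
-- ===== Notes on version B (the rewrite author's own statement) =====
-- stated objective: alternative
-- what changed: Replaces A's two membership-filter scans (filter the priority list by presence, then filter feature_names against the selected list) with a decorate-sort-undecorate pass: one loop tags each kept name with an integer key (its priority rank, or len(priority)+position for non-priority names, deduping priority hits via a seen-rank set), a single stable sort orders the tagged list, and the tags are stripped.
import Mathlib
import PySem

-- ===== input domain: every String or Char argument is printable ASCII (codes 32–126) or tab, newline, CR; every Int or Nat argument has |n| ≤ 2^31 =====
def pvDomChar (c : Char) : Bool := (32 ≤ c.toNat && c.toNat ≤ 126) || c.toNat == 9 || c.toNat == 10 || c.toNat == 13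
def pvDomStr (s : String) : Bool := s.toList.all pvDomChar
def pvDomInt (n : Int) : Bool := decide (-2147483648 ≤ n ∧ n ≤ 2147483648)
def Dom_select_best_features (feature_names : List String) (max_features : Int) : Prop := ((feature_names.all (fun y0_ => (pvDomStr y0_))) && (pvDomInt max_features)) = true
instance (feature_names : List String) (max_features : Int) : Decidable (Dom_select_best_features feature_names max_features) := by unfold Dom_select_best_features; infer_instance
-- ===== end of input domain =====

-- B replaces A's two membership-filter scans with a decorate-sort-undecorate pass:
-- each kept name gets an integer sort key (priority rank, or len(priority)+position),
-- one stable sort orders them, and the tags are stripped (alternative algorithm).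

-- the fixed priority list (defined inside the function in both Pythons)
def pvPriority : List String :=
  ["Bullish_SMA", "SMA_Cross_5_20", "SMA_Cross_20_50",
   "Momentum_Score", "RSI14", "MACD", "ADX",
   "Volume_Intensity", "Close_Position",
   "Price_vs_SMA20", "Price_vs_SMA50",
   "Stoch_K", "Stoch_D", "EMA_Cross_12_26",
   "Vol_5d", "ATR_Ratio", "OBV_Increasing",
   "Outperforming", "Ret_5d",
   "Price_vs_SMA5", "RSI_Avg", "Vol_20d",
   "Consecutive_Ups", "Ret_Acceleration",
   "RSI14_Lag1", "Ret_Lag1"]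

-- ===== PORT A =====
def select_best_features (feature_names : List String) (max_features : Int) : List String :=
  let selected := pvPriority.filter (fun f => feature_names.contains f)
  let remaining := feature_names.filter (fun f => !(selected.contains f))
  PySem.List.slice (selected ++ remaining) none (some max_features)

-- ===== PORT B =====
-- rank = {f: i for i, f in enumerate(priority_features)}
def pvRank : PySem.Dict String Int :=
  (PySem.List.enumerate pvPriority 0).foldl (fun d p => PySem.Dict.insert d p.2 p.1) PySem.Dict.empty

-- the body of B's decorating loop: r = rank.get(f); append (big+i, f) / first-hit (r, f)
def pvStepB (st : PySem.Set Int × List (Int × String)) (p : Int × String) :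
    PySem.Set Int × List (Int × String) :=
  match PySem.Dict.get? pvRank p.2 with
  | none => (st.1, st.2 ++ [((pvPriority.length : Int) + p.1, p.2)])
  | some r =>
    if PySem.Set.contains st.1 r then st
    else (PySem.Set.add st.1 r, st.2 ++ [(r, p.2)])

def select_best_features_alt (feature_names : List String) (max_features : Int) : List String :=
  let st := (PySem.List.enumerate feature_names 0).foldl pvStepB (PySem.Set.empty, [])
  let dec := PySem.List.sorted st.2 (fun p => p.1) false
  (PySem.List.slice dec none (some max_features)).map (fun p => p.2)

-- ===== PRECONDITION & SPEC =====
def Spec_select_best_features (feature_names : List String) (max_features : Int) (out : List String) : Prop := out = select_best_features_alt feature_names max_features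
instance (feature_names : List String) (max_features : Int) (out : List String) : Decidable (Spec_select_best_features feature_names max_features out) := by unfold Spec_select_best_features; infer_instance

-- ===== CLAIM (what is proved, stated in full; the proofs are below) =====
def Claim_equal_select_best_features : Prop := ∀ (feature_names : List String) (max_features : Int), Dom_select_best_features feature_names max_features → Spec_select_best_features feature_names max_features (select_best_features feature_names max_features)

-- ===== LEMMAS AND PROOFS =====

lemma pvPriority_nodup : pvPriority.Nodup := by decide

lemma pvRank_get_none (f : String) : PySem.Dict.get? pvRank f = none ↔ f ∉ pvPriority := by
  rw [PySem.Dict.get?_eq_none_iff_not_mem_keys]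
  have h : PySem.Dict.keys pvRank = pvPriority := by decide
  rw [h]

lemma pvRank_get_some {f : String} {r : Int} (h : PySem.Dict.get? pvRank f = some r) :
    ∃ k : Nat, ∃ hk : k < pvPriority.length, r = (k : Int) ∧ f = pvPriority[k] := by
  have hm := PySem.Dict.mem_items_of_get?_eq_some _ h
  have hitems : pvRank.items = (PySem.List.enumerate pvPriority 0).map (fun p => (p.2, p.1)) := by decide
  rw [hitems] at hm
  obtain ⟨p, hp, he⟩ := List.mem_map.mp hm
  obtain ⟨k, hk, rfl⟩ := (PySem.List.mem_enumerate_iff _ _ _).mp hp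
  refine ⟨k, hk, ?_, ?_⟩ <;> simp_all

-- proof-side recursion equal to B's decorating fold
def pvNE : List String → Int → PySem.Set Int → List (Int × String)
  | [], _, _ => []
  | f :: t, s, seen =>
    match PySem.Dict.get? pvRank f with
    | none => ((pvPriority.length : Int) + s, f) :: pvNE t (s + 1) seen
    | some r =>
      if PySem.Set.contains seen r then pvNE t (s + 1) seen
      else (r, f) :: pvNE t (s + 1) (PySem.Set.add seen r)

lemma pvFold_eq (t : List String) : ∀ (s : Int) (seen : PySem.Set Int) (dec : List (Int × String)),
    ((PySem.List.enumerate t s).foldl pvStepB (seen, dec)).2 = dec ++ pvNE t s seen := by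
  induction t with
  | nil => intro s seen dec; simp [pvNE, PySem.List.enumerate_nil]
  | cons f t ih =>
    intro s seen dec
    rw [PySem.List.enumerate_cons, List.foldl_cons]
    cases h : PySem.Dict.get? pvRank f with
    | none => simp [pvStepB, pvNE, h, ih]
    | some r =>
      by_cases hc : r ∈ seen
      · simp [pvStepB, pvNE, h, hc, ih]
      · simp [pvStepB, pvNE, h, hc, ih]

lemma pvGetElem_inj {k k' : Nat} (hk : k < pvPriority.length) (hk' : k' < pvPriority.length)
    (h : pvPriority[k] = pvPriority[k']) : k = k' :=
  pvPriority_nodup.getElem_inj_iff.mp h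

lemma pvContains_eq (seen : PySem.Set Int) (r : Int) :
    (PySem.Set.contains seen r = true) ↔ r ∈ seen := by
  simp [PySem.Set.contains]

lemma pvNE_mem (t : List String) : ∀ (s : Int) (seen : PySem.Set Int) (x : Int × String),
    x ∈ pvNE t s seen ↔
      (∃ (k : Nat) (hk : k < pvPriority.length),
        x = ((k : Int), pvPriority[k]) ∧ (k : Int) ∉ seen ∧ pvPriority[k] ∈ t)
      ∨ (∃ (i : Nat) (hi : i < t.length),
        x = ((pvPriority.length : Int) + s + (i : Int), t[i]) ∧ t[i] ∉ pvPriority) := by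
  induction t with
  | nil => intro s seen x; simp [pvNE]
  | cons f t ih =>
    intro s seen x
    cases h : PySem.Dict.get? pvRank f with
    | none =>
      have hf : f ∉ pvPriority := (pvRank_get_none f).mp h
      simp only [pvNE, h]
      rw [List.mem_cons, ih]
      constructor
      · rintro (rfl | ⟨k, hk, hx, hs, hm⟩ | ⟨i, hi, hx, hm⟩)
        · exact Or.inr ⟨0, by simp, by simp, by simpa using hf⟩
        · exact Or.inl ⟨k, hk, hx, hs, List.mem_cons_of_mem _ hm⟩
        · refine Or.inr ⟨i + 1, by simpa using hi, ?_, by simpa using hm⟩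
          rw [hx]; congr 1; · push_cast; ring
      · rintro (⟨k, hk, hx, hs, hm⟩ | ⟨i, hi, hx, hm⟩)
        · have hmt : pvPriority[k] ∈ t := by
            rcases List.mem_cons.mp hm with he | ht
            · exact absurd (he ▸ List.getElem_mem hk) hf
            · exact ht
          exact Or.inr (Or.inl ⟨k, hk, hx, hs, hmt⟩)
        · cases i with
          | zero => exact Or.inl (by simpa using hx)
          | succ j =>
            refine Or.inr (Or.inr ⟨j, by simpa using hi, ?_, by simpa using hm⟩)
            rw [hx]; congr 1; · push_cast; ring
    | some r =>
      obtain ⟨k0, hk0, rfl, rfl⟩ := pvRank_get_some h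
      by_cases hc : ((k0 : Int)) ∈ seen
      · simp only [pvNE, h, if_pos ((pvContains_eq seen _).mpr hc)]
        rw [ih]
        constructor
        · rintro (⟨k, hk, hx, hs, hm⟩ | ⟨i, hi, hx, hm⟩)
          · exact Or.inl ⟨k, hk, hx, hs, List.mem_cons_of_mem _ hm⟩
          · refine Or.inr ⟨i + 1, by simpa using hi, ?_, by simpa using hm⟩
            rw [hx]; congr 1; · push_cast; ring
        · rintro (⟨k, hk, hx, hs, hm⟩ | ⟨i, hi, hx, hm⟩)
          · have hmt : pvPriority[k] ∈ t := by
              rcases List.mem_cons.mp hm with he | ht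
              · exact absurd hc (by rw [← pvGetElem_inj hk hk0 he]; exact hs)
              · exact ht
            exact Or.inl ⟨k, hk, hx, hs, hmt⟩
          · cases i with
            | zero =>
              exact absurd (show pvPriority[k0] ∈ pvPriority from List.getElem_mem hk0)
                (by simpa using hm)
            | succ j =>
              refine Or.inr ⟨j, by simpa using hi, ?_, by simpa using hm⟩
              rw [hx]; congr 1; · push_cast; ring
      · simp only [pvNE, h, if_neg ((pvContains_eq seen _).not.mpr hc)]
        rw [List.mem_cons, ih]
        constructor
        · rintro (rfl | ⟨k, hk, hx, hs, hm⟩ | ⟨i, hi, hx, hm⟩)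
          · exact Or.inl ⟨k0, hk0, rfl, hc, List.mem_cons_self⟩
          · have hs' : ((k : Int)) ∉ seen := fun hin => hs (PySem.Set.mem_add _ _ _ |>.mpr (Or.inl hin))
            exact Or.inl ⟨k, hk, hx, hs', List.mem_cons_of_mem _ hm⟩
          · refine Or.inr ⟨i + 1, by simpa using hi, ?_, by simpa using hm⟩
            rw [hx]; congr 1; · push_cast; ring
        · rintro (⟨k, hk, hx, hs, hm⟩ | ⟨i, hi, hx, hm⟩)
          · by_cases hkk : k = k0
            · subst hkk; exact Or.inl (by rw [hx])
            · have he : pvPriority[k] ∈ t := by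
                rcases List.mem_cons.mp hm with he | ht
                · exact absurd (pvGetElem_inj hk hk0 he) hkk
                · exact ht
              have hs' : ((k : Int)) ∉ PySem.Set.add seen ((k0 : Int)) := by
                intro hin
                rcases (PySem.Set.mem_add _ _ _).mp hin with h1 | h1
                · exact hs h1
                · exact hkk (by exact_mod_cast h1)
              exact Or.inr (Or.inl ⟨k, hk, hx, hs', he⟩)
          · cases i with
            | zero =>
              exact absurd (show pvPriority[k0] ∈ pvPriority from List.getElem_mem hk0)
                (by simpa using hm)
            | succ j =>
              refine Or.inr (Or.inr ⟨j, by simpa using hi, ?_, by simpa using hm⟩)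
              rw [hx]; congr 1; · push_cast; ring

-- every emitted key is a fresh priority rank or at least len(priority)+s
lemma pvNE_bound (t : List String) : ∀ (s : Int) (seen : PySem.Set Int) (x : Int × String),
    x ∈ pvNE t s seen →
      (0 ≤ x.1 ∧ x.1 < (pvPriority.length : Int) ∧ x.1 ∉ seen) ∨ ((pvPriority.length : Int) + s ≤ x.1) := by
  induction t with
  | nil => intro s seen x hx; simp [pvNE] at hx
  | cons f t ih =>
    intro s seen x hx
    cases h : PySem.Dict.get? pvRank f with
    | none =>
      simp only [pvNE, h] at hx
      rcases List.mem_cons.mp hx with rfl | hx'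
      · right; simp
      · rcases ih (s + 1) seen x hx' with h1 | h1
        · exact Or.inl h1
        · right; omega
    | some r =>
      obtain ⟨k0, hk0, rfl, rfl⟩ := pvRank_get_some h
      by_cases hc : ((k0 : Int)) ∈ seen
      · simp only [pvNE, h, if_pos ((pvContains_eq seen _).mpr hc)] at hx
        rcases ih (s + 1) seen x hx with h1 | h1
        · exact Or.inl h1
        · right; omega
      · simp only [pvNE, h, if_neg ((pvContains_eq seen _).not.mpr hc)] at hx
        rcases List.mem_cons.mp hx with rfl | hx'
        · left; refine ⟨by positivity, by simp; exact_mod_cast hk0, by simpa using hc⟩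
        · rcases ih (s + 1) _ x hx' with ⟨h1, h2, h3⟩ | h1
          · exact Or.inl ⟨h1, h2, fun hin => h3 ((PySem.Set.mem_add _ _ _).mpr (Or.inl hin))⟩
          · right; omega

lemma pvNE_keys_pairwise (t : List String) : ∀ (s : Int) (seen : PySem.Set Int), 0 ≤ s →
    (pvNE t s seen).Pairwise (fun a b => a.1 ≠ b.1) := by
  induction t with
  | nil => intro s seen _; simp [pvNE]
  | cons f t ih =>
    intro s seen hs
    cases h : PySem.Dict.get? pvRank f with
    | none =>
      simp only [pvNE, h]
      refine List.Pairwise.cons ?_ (ih (s + 1) seen (by omega))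
      intro y hy
      rcases pvNE_bound t (s + 1) seen y hy with ⟨_, h2, _⟩ | h1 <;> simp <;> omega
    | some r =>
      obtain ⟨k0, hk0, rfl, rfl⟩ := pvRank_get_some h
      by_cases hc : ((k0 : Int)) ∈ seen
      · simp only [pvNE, h, if_pos ((pvContains_eq seen _).mpr hc)]
        exact ih (s + 1) seen (by omega)
      · simp only [pvNE, h, if_neg ((pvContains_eq seen _).not.mpr hc)]
        refine List.Pairwise.cons ?_ (ih (s + 1) _ (by omega))
        intro y hy
        rcases pvNE_bound t (s + 1) _ y hy with ⟨_, _, h3⟩ | h1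
        · exact fun he => h3 ((PySem.Set.mem_add _ _ _).mpr (Or.inr he.symm))
        · have : ((k0 : Int)) < (pvPriority.length : Int) := by exact_mod_cast hk0
          simp; omega

-- the two halves of the sorted order
def pvYs1 (names : List String) : List (Int × String) :=
  (PySem.List.enumerate pvPriority 0).filter (fun p => names.contains p.2)

def pvYs2 (names : List String) : List (Int × String) :=
  ((PySem.List.enumerate names 0).filter (fun p => !(pvPriority.contains p.2))).map
    (fun p => ((pvPriority.length : Int) + p.1, p.2))

lemma pvYs_pairwise (names : List String) :
    (pvYs1 names ++ pvYs2 names).Pairwise (fun a b => a.1 < b.1) := by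
  rw [List.pairwise_append]
  refine ⟨(PySem.List.pairwise_lt_enumerate pvPriority 0).filter _, ?_, ?_⟩
  · exact List.pairwise_map.mpr (((PySem.List.pairwise_lt_enumerate names 0).filter _).imp
      (fun hab => by simpa using add_lt_add_left hab ((pvPriority.length : Int))))
  · intro x hx y hy
    obtain ⟨hmx, _⟩ := List.mem_filter.mp hx
    obtain ⟨k, hk, rfl⟩ := (PySem.List.mem_enumerate_iff _ _ _).mp hmx
    obtain ⟨p, hp, rfl⟩ := List.mem_map.mp hy
    obtain ⟨hmy, _⟩ := List.mem_filter.mp hp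
    obtain ⟨i, hi, rfl⟩ := (PySem.List.mem_enumerate_iff _ _ _).mp hmy
    have hkL : ((k : Int)) < (pvPriority.length : Int) := by exact_mod_cast hk
    simp only []
    omega

lemma pvYs_perm (names : List String) :
    (pvYs1 names ++ pvYs2 names).Perm (pvNE names 0 PySem.Set.empty) := by
  have h1 : (pvYs1 names ++ pvYs2 names).Nodup :=
    (pvYs_pairwise names).imp (fun hab he => by rw [he] at hab; exact lt_irrefl _ hab)
  have h2 : (pvNE names 0 PySem.Set.empty).Nodup :=
    (pvNE_keys_pairwise names 0 PySem.Set.empty (by omega)).imp (fun hab he => hab (by rw [he]))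
  rw [List.perm_ext_iff_of_nodup h1 h2]
  intro a
  rw [List.mem_append, pvNE_mem]
  constructor
  · rintro (ha | ha)
    · obtain ⟨hmem, hcont⟩ := List.mem_filter.mp ha
      obtain ⟨k, hk, rfl⟩ := (PySem.List.mem_enumerate_iff _ _ _).mp hmem
      exact Or.inl ⟨k, hk, by simp, by simp [PySem.Set.empty], by simpa using hcont⟩
    · obtain ⟨p, hp, rfl⟩ := List.mem_map.mp ha
      obtain ⟨hmem, hcont⟩ := List.mem_filter.mp hp
      obtain ⟨i, hi, rfl⟩ := (PySem.List.mem_enumerate_iff _ _ _).mp hmem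
      exact Or.inr ⟨i, hi, by simp, by simpa using hcont⟩
  · rintro (⟨k, hk, rfl, _, hmem⟩ | ⟨i, hi, rfl, hmem⟩)
    · left
      refine List.mem_filter.mpr ⟨?_, by simpa using hmem⟩
      exact (PySem.List.mem_enumerate_iff _ _ _).mpr ⟨k, hk, by simp⟩
    · right
      refine List.mem_map.mpr ⟨((0 : Int) + (i : Int), names[i]), ?_, by simp⟩
      refine List.mem_filter.mpr ⟨?_, by simpa using hmem⟩
      exact (PySem.List.mem_enumerate_iff _ _ _).mpr ⟨i, hi, rfl⟩

lemma pvSlice_map {α β : Type} (l : List α) (g : α → β) (m : Int) :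
    PySem.List.slice (l.map g) none (some m) = (PySem.List.slice l none (some m)).map g := by
  by_cases hm : 0 ≤ m
  · rw [PySem.List.slice_to _ hm, PySem.List.slice_to _ hm, List.map_take]
  · have hk : ∃ k : Nat, 0 < k ∧ m = -(k : Int) := ⟨(-m).toNat, by omega, by omega⟩

    obtain ⟨k, hk0, rfl⟩ := hk
    rw [PySem.List.slice_to_neg_natCast _ _ hk0, PySem.List.slice_to_neg_natCast _ _ hk0,
      List.map_take, List.length_map]

lemma pvEnum_filter_map {α : Type} (xs : List α) : ∀ (s : Int) (q : α → Bool),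
    (((PySem.List.enumerate xs s).filter (fun p => q p.2)).map (fun p => p.2)) = xs.filter q := by
  induction xs with
  | nil => intro s q; simp [PySem.List.enumerate_nil]
  | cons x t ih =>
    intro s q
    rw [PySem.List.enumerate_cons, List.filter_cons]
    by_cases hq : q x
    · simp [hq, ih]
    · simp [hq, ih]

lemma pvMain (names : List String) (m : Int) :
    select_best_features names m = select_best_features_alt names m := by
  unfold select_best_features select_best_features_alt
  dsimp only
  rw [pvFold_eq names 0 PySem.Set.empty [], List.nil_append]
  rw [PySem.List.sorted_eq_of_perm_of_pairwise_lt _ _ _ (pvYs_perm names) (pvYs_pairwise names)]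
  rw [← pvSlice_map]
  have h1 : (pvYs1 names ++ pvYs2 names).map (fun p => p.2)
      = pvPriority.filter (fun f => names.contains f)
        ++ names.filter (fun f => !(pvPriority.contains f)) := by
    rw [List.map_append]
    unfold pvYs1 pvYs2
    rw [List.map_map]
    simp only [Function.comp_def]
    rw [pvEnum_filter_map, pvEnum_filter_map names 0 (fun f => !(pvPriority.contains f))]
  rw [h1]
  have hrem : names.filter (fun f => !((pvPriority.filter (fun g => names.contains g)).contains f))
      = names.filter (fun f => !(pvPriority.contains f)) := by
    apply List.filter_congr
    intro f hf
    have hc : (pvPriority.filter (fun g => names.contains g)).contains f = pvPriority.contains f := by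
      by_cases hfp : f ∈ pvPriority
      · simp [hfp, hf]
      · simp [hfp]
    rw [hc]
  rw [hrem]

-- ===== VERDICT (by name: the statement is the Claim_ definition above) =====
theorem select_best_features_spec : Claim_equal_select_best_features := by
  intro names m _
  exact pvMain names m
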